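-- pv_equiv track=rewrite | github.com/vntan1402/27-12-2025-Deploy-by-space-GG | test_report_batch_upload_test.py | find_error_patterns
-- ===== SOURCE A (Python) =====
-- from typing import Dict, Any, List, Optional
--
-- def find_error_patterns(log_content: str) -> List[str]:
--     """Find error patterns in log content"""
--     error_patterns = []
--
--     error_keywords = [
--         "ERROR", "CRITICAL", "FAILED", "Exception", "Traceback",
--         "test report", "batch", "upload", "_file_content", "missing"
--     ]
--
--     lines = log_content.split('\n')
--     for line in lines:
--         for keyword in error_keywords:
--             if keyword.lower() in line.lower():
--                 error_patterns.append(line.strip())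
--                 break
--
--     return error_patterns
-- ===== SOURCE B (Python) =====
-- import re
--
-- _LOW_KEYWORDS = [
--     "error", "critical", "failed", "exception", "traceback",
--     "test report", "batch", "upload", "_file_content", "missing"
-- ]
-- _PATTERN = re.compile("|".join(re.escape(k) for k in _LOW_KEYWORDS))
--
--
-- def find_error_patterns(log_content: str):
--     """Find error patterns in log content"""
--     return [line.strip() for line in log_content.split('\n')
--             if _PATTERN.search(line.lower())]
-- ===== Notes on version B (the rewrite author's own statement) =====
-- stated objective: idiomatic
-- what changed: The inner per-keyword loop with break is replaced by one precompiled regex alternation of the pre-lowercased keywords applied to the lowercased line, and the accumulator loop becomes a list comprehension.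
import Mathlib
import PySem

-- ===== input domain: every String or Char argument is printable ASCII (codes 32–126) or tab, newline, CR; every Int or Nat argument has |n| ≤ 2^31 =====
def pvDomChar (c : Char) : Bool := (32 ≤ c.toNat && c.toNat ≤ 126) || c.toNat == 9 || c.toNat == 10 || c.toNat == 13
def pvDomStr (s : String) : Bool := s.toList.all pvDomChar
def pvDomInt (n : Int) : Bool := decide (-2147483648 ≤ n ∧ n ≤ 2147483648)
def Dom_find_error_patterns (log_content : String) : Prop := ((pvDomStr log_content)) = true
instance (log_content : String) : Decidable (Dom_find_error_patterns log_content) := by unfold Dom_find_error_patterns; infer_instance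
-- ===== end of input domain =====

-- B replaces A's inner keyword loop by one regex-alternation scan over the once-lowercased line (idiomatic; same output).

-- ===== PORT A =====
def errKeywords : List String :=
  ["ERROR", "CRITICAL", "FAILED", "Exception", "Traceback",
   "test report", "batch", "upload", "_file_content", "missing"]

-- inner 'for keyword in error_keywords: if keyword.lower() in line.lower(): append(line.strip()); break'
def aInner (acc : List String) (line : String) : List String → List String
  | [] => acc
  | kw :: rest =>
    if PySem.Str.isIn (PySem.Str.lower kw) (PySem.Str.lower line) then
      acc ++ [PySem.Str.strip line]
    else aInner acc line rest

def find_error_patterns (log_content : String) : List String :=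
  ((PySem.Str.split? log_content "\n").getD []).foldl
    (fun acc line => aInner acc line errKeywords) []

-- ===== PORT B =====
-- the pre-lowercased keywords the alternation is compiled from
def lowKeywords : List (List Char) :=
  ["error".toList, "critical".toList, "failed".toList, "exception".toList, "traceback".toList,
   "test report".toList, "batch".toList, "upload".toList, "_file_content".toList, "missing".toList]

-- the alternation at one position: does some branch match starting here?
def matchAt (cs : List Char) : Bool := lowKeywords.any (fun kw => kw.isPrefixOf cs)

-- re.search of the literal alternation: try each start position left to right
def searchAlt : List Char → Bool
  | [] => matchAt []
  | c :: rest => matchAt (c :: rest) || searchAlt rest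

def find_error_patterns_alt (log_content : String) : List String :=
  (((PySem.Str.split? log_content "\n").getD []).filter
      (fun line => searchAlt (PySem.Chars.lower line.toList))).map
    (fun line => PySem.Str.strip line)

-- ===== PRECONDITION & SPEC =====
def Spec_find_error_patterns (log_content : String) (out : List String) : Prop := out = find_error_patterns_alt log_content
instance (log_content : String) (out : List String) : Decidable (Spec_find_error_patterns log_content out) := by unfold Spec_find_error_patterns; infer_instance

-- ===== CLAIM (what is proved, stated in full; the proofs are below) =====
def Claim_equal_find_error_patterns : Prop := ∀ (log_content : String), Dom_find_error_patterns log_content → Spec_find_error_patterns log_content (find_error_patterns log_content)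

-- ===== LEMMAS AND PROOFS =====

-- the position-by-position alternation scan succeeds iff some keyword occurs as an infix
theorem searchAlt_eq_any_isIn (cs : List Char) :
    searchAlt cs = lowKeywords.any (fun kw => PySem.Chars.isIn kw cs) := by
  induction cs with
  | nil => decide
  | cons c rest ih =>
    rw [searchAlt, ih, matchAt]
    apply Bool.eq_iff_iff.mpr
    simp only [Bool.or_eq_true, List.any_eq_true,
      PySem.Chars.isIn_iff_infix, List.isPrefixOf_iff_prefix]
    constructor
    · rintro (⟨kw, hkw, hp⟩ | ⟨kw, hkw, hi⟩)
      · exact ⟨kw, hkw, hp.isInfix⟩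
      · exact ⟨kw, hkw, List.infix_cons_iff.mpr (Or.inr hi)⟩
    · rintro ⟨kw, hkw, hi⟩
      rcases List.infix_cons_iff.mp hi with hp | hi'
      · exact Or.inl ⟨kw, hkw, hp⟩
      · exact Or.inr ⟨kw, hkw, hi'⟩

-- A's inner loop over any keyword list is append-iff-any
theorem aInner_any (acc : List String) (line : String) (kws : List String) :
    aInner acc line kws =
      acc ++ (if kws.any (fun kw => PySem.Str.isIn (PySem.Str.lower kw) (PySem.Str.lower line))
              then [PySem.Str.strip line] else []) := by
  induction kws with
  | nil => simp [aInner]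
  | cons kw rest ih =>
    rw [aInner, List.any_cons]
    cases h : PySem.Str.isIn (PySem.Str.lower kw) (PySem.Str.lower line)
    · rw [if_neg (by simp), ih, Bool.false_or]
    · rw [if_pos rfl, Bool.true_or, if_pos rfl]

-- per line: A's keyword test equals B's alternation scan of the lowered line
theorem any_keyword_eq_searchAlt (line : String) :
    errKeywords.any (fun kw => PySem.Str.isIn (PySem.Str.lower kw) (PySem.Str.lower line)) =
      searchAlt (PySem.Chars.lower line.toList) := by
  rw [searchAlt_eq_any_isIn]
  have hlow : ∀ kw : String, PySem.Str.isIn (PySem.Str.lower kw) (PySem.Str.lower line) =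
      PySem.Chars.isIn (PySem.Chars.lower kw.toList) (PySem.Chars.lower line.toList) := by
    intro kw
    simp only [PySem.Str.isIn_eq, PySem.Str.toList_lower]
  simp only [errKeywords, lowKeywords, List.any_cons, List.any_nil, hlow]
  rfl

theorem find_error_patterns_spec : Claim_equal_find_error_patterns := by
  intro log_content _
  show find_error_patterns log_content = find_error_patterns_alt log_content
  unfold find_error_patterns find_error_patterns_alt
  generalize (PySem.Str.split? log_content "\n").getD [] = lines
  have hfun : (fun (acc : List String) line => aInner acc line errKeywords) =
      fun acc line =>
        if searchAlt (PySem.Chars.lower line.toList) then acc ++ [PySem.Str.strip line] else acc := by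
    funext acc line
    rw [aInner_any, any_keyword_eq_searchAlt]
    by_cases h : searchAlt (PySem.Chars.lower line.toList) <;> simp [h]
  rw [hfun, PySem.List.foldl_append_if]
  simp
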